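-- pv_equiv track=rewrite | github.com/Nenavathnaresh/Python_DSA | Recursion/Medium/N-digits-num-with-digits-in-increasing-order.py | increasingNumbers
-- ===== SOURCE A (Python) =====
-- def increasingNumbers(n):
--     def generate_numbers(current, start, n):
--         if n == 0:
--             result.append(current)
--             return
--         for digit in range(start, 10):
--             generate_numbers(current * 10 + digit, digit + 1, n - 1)
--
--     result = []
--     if n == 1:
--         result.append(0)
--     for digit in range(1, 10):
--         generate_numbers(digit, digit + 1, n - 1)
--
--     return result
-- ===== SOURCE B (Python) =====
-- def increasingNumbers(n):
--     if n < 1: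
--         return []
--     pairs = [(d, d) for d in range(1, 10)]
--     for _ in range(n - 1):
--         if not pairs:
--             break
--         pairs = [(num * 10 + e, e) for num, last in pairs for e in range(last + 1, 10)]
--     nums = [num for num, _ in pairs]
--     return [0] + nums if n == 1 else nums
-- ===== Notes on version B (the rewrite author's own statement) =====
-- stated objective: idiomatic
-- what changed: Replaced the recursive backtracking (inner DFS function appending to a shared result list) with an iterative level-wise expansion: keep (number,last-digit) pairs and extend each level by all larger digits n-1 times.
import Mathlib
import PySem

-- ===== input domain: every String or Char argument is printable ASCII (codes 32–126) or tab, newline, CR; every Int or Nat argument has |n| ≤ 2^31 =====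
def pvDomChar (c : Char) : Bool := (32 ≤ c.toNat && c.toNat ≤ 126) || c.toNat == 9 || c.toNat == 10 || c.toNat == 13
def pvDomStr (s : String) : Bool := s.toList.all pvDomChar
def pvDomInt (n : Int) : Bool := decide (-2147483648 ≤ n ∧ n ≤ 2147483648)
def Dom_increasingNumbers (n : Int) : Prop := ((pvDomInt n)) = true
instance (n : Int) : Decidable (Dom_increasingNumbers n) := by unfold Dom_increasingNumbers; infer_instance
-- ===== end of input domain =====

-- B replaces A's recursive backtracking with an iterative level-wise expansion of (number, last-digit) pairs; objective: a more idiomatic, loop-based decomposition (no speed claim).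


-- ===== PORT A =====
-- generate_numbers ported with a Nat fuel (the Python recursion always terminates because
-- `start` strictly increases and range(start,10) empties; fuel 10 is never exhausted).
def genA : Nat → Int → Int → Int → List Int
  | 0, _, _, _ => []
  | Nat.succ f, current, start, n =>
    if n = 0 then [current]
    else (PySem.List.pyRange start 10 1).foldl
      (fun acc d => acc ++ genA f (current * 10 + d) (d + 1) (n - 1)) []

def increasingNumbers (n : Int) : List Int :=
  let result : List Int := if n = 1 then [0] else []
  (PySem.List.pyRange 1 10 1).foldl
    (fun acc d => acc ++ genA 10 d (d + 1) (n - 1)) result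

-- ===== PORT B =====
def altStep (pairs : List (Int × Int)) : List (Int × Int) :=
  pairs.flatMap (fun p => (PySem.List.pyRange (p.2 + 1) 10 1).map (fun e => (p.1 * 10 + e, e)))

-- the 'for _ in range(n-1)' loop with its early 'break' on an empty level
def altLoop : Nat → List (Int × Int) → List (Int × Int)
  | 0, pairs => pairs
  | k + 1, pairs => if pairs = [] then pairs else altLoop k (altStep pairs)

def increasingNumbers_alt (n : Int) : List Int :=
  if n < 1 then []
  else
    let pairs := (PySem.List.pyRange 1 10 1).map (fun d => (d, d))
    let pairs := altLoop (n - 1).toNat pairs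
    let nums := pairs.map Prod.fst
    if n = 1 then 0 :: nums else nums

-- ===== PRECONDITION & SPEC =====
def Spec_increasingNumbers (n : Int) (out : List Int) : Prop := out = increasingNumbers_alt n
instance (n : Int) (out : List Int) : Decidable (Spec_increasingNumbers n out) := by unfold Spec_increasingNumbers; infer_instance

-- ===== CLAIM (what is proved, stated in full; the proofs are below) =====
def Claim_equal_increasingNumbers : Prop := ∀ (n : Int), Dom_increasingNumbers n → Spec_increasingNumbers n (increasingNumbers n)

-- ===== LEMMAS AND PROOFS =====

lemma genA_neg (f : Nat) : ∀ (c s n : Int), n < 0 → genA f c s n = [] := by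
  induction f with
  | zero => intro c s n _; rfl
  | succ f ih =>
    intro c s n hn
    simp only [genA, if_neg (by omega : ¬ n = 0), PySem.List.foldl_append_eq_flatMap]
    simp only [List.nil_append, List.flatMap_eq_nil_iff]
    intro x _
    exact ih _ _ _ (by omega)

lemma genA_large (f : Nat) : ∀ (c s n : Int), 1 ≤ n → 10 - s < n → genA f c s n = [] := by
  induction f with
  | zero => intro c s n _ _; rfl
  | succ f ih =>
    intro c s n h1 h2
    simp only [genA, if_neg (by omega : ¬ n = 0), PySem.List.foldl_append_eq_flatMap]
    simp only [List.nil_append, List.flatMap_eq_nil_iff]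
    intro d hd
    rw [PySem.List.mem_pyRange_one] at hd
    exact ih _ _ _ (by omega) (by omega)

lemma A_nonpos (n : Int) (h : n ≤ 0) : increasingNumbers n = [] := by
  unfold increasingNumbers
  rw [if_neg (by omega : ¬ n = 1), PySem.List.foldl_append_eq_flatMap, List.nil_append,
    List.flatMap_eq_nil_iff]
  intro d _
  exact genA_neg 10 _ _ _ (by omega)

lemma A_large (n : Int) (h : 10 ≤ n) : increasingNumbers n = [] := by
  unfold increasingNumbers
  rw [if_neg (by omega : ¬ n = 1), PySem.List.foldl_append_eq_flatMap, List.nil_append,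
    List.flatMap_eq_nil_iff]
  intro d hd
  rw [PySem.List.mem_pyRange_one] at hd
  exact genA_large 10 _ _ _ (by omega) (by omega)

lemma altLoop_nil (k : Nat) : altLoop k [] = [] := by cases k <;> rfl

lemma altLoop_stays_nil (j : Nat) : ∀ (p : List (Int × Int)), altLoop j p = [] →
    ∀ (m : Nat), altLoop (m + j) p = [] := by
  induction j with
  | zero => intro p hp m; exact hp ▸ altLoop_nil m
  | succ j ih =>
    intro p hp m
    by_cases h : p = []
    · subst h; exact altLoop_nil _
    · rw [show m + (j + 1) = (m + j) + 1 by omega, altLoop, if_neg h]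
      rw [altLoop, if_neg h] at hp
      exact ih _ hp m

lemma altLoop_9 : altLoop 9 ((PySem.List.pyRange 1 10 1).map (fun d => (d, d))) = [] := by
  decide

lemma alt_large (n : Int) (h : 10 ≤ n) : increasingNumbers_alt n = [] := by
  have hm : (n - 1).toNat = ((n - 1).toNat - 9) + 9 := by omega
  unfold increasingNumbers_alt
  rw [if_neg (by omega : ¬ n < 1), if_neg (by omega : ¬ n = 1), hm,
    altLoop_stays_nil 9 _ altLoop_9 _]
  rfl

-- ===== VERDICT (by name: the statement is the Claim_ definition above) =====
theorem increasingNumbers_spec : Claim_equal_increasingNumbers := by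
  intro n hdom
  unfold Spec_increasingNumbers
  rcases lt_or_ge n 1 with h | h
  · rw [A_nonpos n (by omega)]
    unfold increasingNumbers_alt
    rw [if_pos h]
  · rcases lt_or_ge n 10 with h9 | h9
    · have hc : n = 1 ∨ n = 2 ∨ n = 3 ∨ n = 4 ∨ n = 5 ∨ n = 6 ∨ n = 7 ∨ n = 8 ∨ n = 9 := by
        omega
      rcases hc with rfl | rfl | rfl | rfl | rfl | rfl | rfl | rfl | rfl <;> decide
    · rw [A_large n h9, alt_large n h9]
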